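-- pv_equiv track=rewrite | github.com/dualform-labs/m5-infer | app/innovation/x4_context_fold/schema_analyzer.py | _find_common_suffix_length
-- ===== SOURCE A (Python) =====
-- def _find_common_suffix_length(token_lists: list[list[int]]) -> int:
--     """Find the length of the common suffix across all token lists."""
--     if not token_lists:
--         return 0
--     min_len = min(len(t) for t in token_lists)
--     suffix_len = 0
--     for i in range(1, min_len + 1):
--         if all(t[-i] == token_lists[0][-i] for t in token_lists):
--             suffix_len = i
--         else:
--             break
--     return suffix_len
-- ===== SOURCE B (Python) =====
-- def _find_common_suffix_length(token_lists: list[list[int]]) -> int: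
--     """Pairwise fold: shrink a match length k against the first list, one list at a time."""
--     if not token_lists:
--         return 0
--     ref = token_lists[0][::-1]
--     k = len(ref)
--     for t in token_lists[1:]:
--         r = t[::-1]
--         m = 0
--         while m < min(k, len(r)) and r[m] == ref[m]:
--             m += 1
--         k = m
--     return k
-- ===== Notes on version B (the rewrite author's own statement) =====
-- stated objective: alternative
-- what changed: Replaced A's precomputed min-length plus per-position all()-across-lists column scan by a pairwise fold: iterate over the lists once, matching each list's reversed prefix against the first list's reversed prefix only up to the best length found so far, shrinking that bound list by list.
import Mathlib
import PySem

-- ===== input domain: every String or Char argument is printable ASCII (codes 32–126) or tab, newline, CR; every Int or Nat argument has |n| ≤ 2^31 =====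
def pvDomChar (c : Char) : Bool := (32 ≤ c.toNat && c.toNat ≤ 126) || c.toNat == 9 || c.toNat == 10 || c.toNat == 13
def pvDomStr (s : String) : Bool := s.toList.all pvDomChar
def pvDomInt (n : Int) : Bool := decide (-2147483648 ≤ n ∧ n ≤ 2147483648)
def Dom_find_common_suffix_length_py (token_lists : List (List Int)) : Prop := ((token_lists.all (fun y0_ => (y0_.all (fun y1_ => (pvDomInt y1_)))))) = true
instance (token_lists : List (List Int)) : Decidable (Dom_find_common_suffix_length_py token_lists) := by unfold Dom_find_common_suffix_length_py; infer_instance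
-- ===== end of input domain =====

-- B replaces A's min-length pass + column-wise all()-scan by a pairwise fold over the
-- lists, shrinking a match length against the first list (alternative decomposition;
-- same return value everywhere).

-- ===== PORT A =====
-- the 'for i in range(1, min_len + 1): … else: break' loop of A
def pvALoop (token_lists : List (List Int)) (t0 : List Int) (minLen i suffix : Int) : Int :=
  if _h : i ≤ minLen then
    if token_lists.all (fun t => PySem.List.pyGet? t (-i) == PySem.List.pyGet? t0 (-i)) then
      pvALoop token_lists t0 minLen (i + 1) i
    else suffix
  else suffix
termination_by (minLen + 1 - i).toNat
decreasing_by omega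

def find_common_suffix_length_py (token_lists : List (List Int)) : Int :=
  if token_lists.isEmpty then 0
  else
    match PySem.List.min? (token_lists.map (fun t => (t.length : Int))) (fun x => x) with
    | none => 0  -- unreachable: the list is nonempty here
    | some minLen => pvALoop token_lists (token_lists.headD []) minLen 1 0

-- ===== PORT B =====
-- the 'while m < min(k, len(r)) and r[m] == ref[m]: m += 1' loop of Source B
def pvWhile (ref r : List Int) (k : Int) (m : Int) : Int :=
  if _h : m < min k (r.length : Int) ∧ PySem.List.pyGet? r m = PySem.List.pyGet? ref m then
    pvWhile ref r k (m + 1)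
  else m
termination_by (min k (r.length : Int) - m).toNat
decreasing_by
  rcases _h with ⟨h1, -⟩
  rcases le_total k (r.length : Int) with h | h <;> simp [h] at h1 ⊢ <;> omega

-- t[::-1] is List.reverse; the 'for t in token_lists[1:]: … k = m' loop is a foldl
def find_common_suffix_length_py_alt (token_lists : List (List Int)) : Int :=
  match token_lists with
  | [] => 0
  | t0 :: rest =>
    let ref := t0.reverse
    rest.foldl (fun k t => pvWhile ref t.reverse k 0) (ref.length : Int)

-- ===== PRECONDITION & SPEC =====
def Spec_find_common_suffix_length_py (token_lists : List (List Int)) (out : Int) : Prop := out = find_common_suffix_length_py_alt token_lists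
instance (token_lists : List (List Int)) (out : Int) : Decidable (Spec_find_common_suffix_length_py token_lists out) := by unfold Spec_find_common_suffix_length_py; infer_instance

-- ===== CLAIM (what is proved, stated in full; the proofs are below) =====
def Claim_equal_find_common_suffix_length_py : Prop := ∀ (token_lists : List (List Int)), Dom_find_common_suffix_length_py token_lists → Spec_find_common_suffix_length_py token_lists (find_common_suffix_length_py token_lists)

-- ===== LEMMAS AND PROOFS =====

/-- longest common prefix length of two lists -/
def pvLcp : List Int → List Int → Nat
  | a :: as, b :: bs => if a = b then pvLcp as bs + 1 else 0
  | _, _ => 0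

theorem pvLcp_nil_right (a : List Int) : pvLcp a [] = 0 := by cases a <;> rfl

theorem pvLcp_le_right : ∀ (a b : List Int), pvLcp a b ≤ b.length := by
  intro a
  induction a with
  | nil => intro b; cases b <;> simp [pvLcp]
  | cons x as ih =>
      intro b
      cases b with
      | nil => simp [pvLcp]
      | cons y bs =>
          by_cases h : x = y <;> simp [pvLcp, h]
          exact ih bs

theorem pvLcp_get : ∀ (a b : List Int) (j : Nat), j < pvLcp a b → a[j]? = b[j]? := by
  intro a
  induction a with
  | nil => intro b j h; cases b <;> simp [pvLcp] at h
  | cons x as ih =>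
      intro b j h
      cases b with
      | nil => simp [pvLcp] at h
      | cons y bs =>
          by_cases hx : x = y
          · cases j with
            | zero => simp [hx]
            | succ j' =>
                simp only [pvLcp, if_pos hx] at h
                simpa using ih bs j' (by omega)
          · simp [pvLcp, hx] at h

theorem pvLcp_ne : ∀ (a b : List Int), pvLcp a b < a.length → pvLcp a b < b.length →
    a[pvLcp a b]? ≠ b[pvLcp a b]? := by
  intro a
  induction a with
  | nil => intro b h _; simp at h
  | cons x as ih =>
      intro b ha hb
      cases b with
      | nil => simp at hb
      | cons y bs =>
          by_cases hx : x = y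
          · simp only [pvLcp, if_pos hx, List.length_cons] at ha hb ⊢
            simpa using ih bs (by omega) (by omega)
          · simp [pvLcp, hx]

-- the while-loop of B computes m + min(k-m, lcp of the drops)
theorem pvWhile_eq (ref r : List Int) (k : Int) (m : Nat)
    (hm : (m : Int) ≤ k) (hk : k ≤ (ref.length : Int)) :
    pvWhile ref r k m = (m : Int) + min (k - m) ((pvLcp (ref.drop m) (r.drop m) : Nat) : Int) := by
  suffices H : ∀ (n : Nat) (m : Nat), (m : Int) ≤ k → (min k (r.length : Int) - m).toNat = n →
      pvWhile ref r k m = (m : Int) + min (k - m) ((pvLcp (ref.drop m) (r.drop m) : Nat) : Int) by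
    exact H _ m hm rfl
  intro n
  induction n with
  | zero =>
      intro m hm h0
      rw [pvWhile]
      have hstop : ¬ ((m : Int) < min k (r.length : Int)) := by omega
      rw [dif_neg (by exact fun hc => hstop hc.1)]
      rcases le_or_gt k (m : Int) with hkm | hkm
      · have : k - m = 0 := by omega
        rw [this]
        have : min (0 : Int) ((pvLcp (ref.drop m) (r.drop m) : Nat) : Int) = 0 := by
          apply min_eq_left; exact_mod_cast Nat.zero_le _
        omega
      · -- then m ≥ r.length, so r.drop m = []
        have hrm : r.length ≤ m := by
          rcases le_total k (r.length : Int) with h | h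
          · omega
          · simp only [min_eq_right h] at hstop; exact_mod_cast not_lt.mp hstop
        have : r.drop m = [] := List.drop_eq_nil_of_le hrm
        rw [this, pvLcp_nil_right]
        have : min (k - m) ((0 : Nat) : Int) = 0 := by
          apply min_eq_right; omega
        rw [this]; ring
  | succ n ih =>
      intro m hm h0
      rw [pvWhile]
      have hmr : m < r.length := by
        have : (m : Int) < min k (r.length : Int) := by omega
        rcases le_total k (r.length : Int) with h | h
        · have : (m : Int) < k := by omega
          exact_mod_cast lt_of_lt_of_le (by omega : (m:Int) < k) h
        · simp only [min_eq_right h] at this; exact_mod_cast this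
      have hmk : (m : Int) < k := by
        have : (m : Int) < min k (r.length : Int) := by omega
        omega
      have hmref : m < ref.length := by exact_mod_cast lt_of_lt_of_le hmk hk
      have hgr : PySem.List.pyGet? r (m : Int) = r[m]? := PySem.List.pyGet?_natCast r m
      have hgref : PySem.List.pyGet? ref (m : Int) = ref[m]? := PySem.List.pyGet?_natCast ref m
      have hdropr : r.drop m = r[m] :: r.drop (m + 1) := List.drop_eq_getElem_cons hmr
      have hdropref : ref.drop m = ref[m] :: ref.drop (m + 1) := List.drop_eq_getElem_cons hmref
      by_cases heq : r[m] = ref[m]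
      · rw [dif_pos ⟨by omega, by rw [hgr, hgref, List.getElem?_eq_getElem hmr, List.getElem?_eq_getElem hmref, heq]⟩]
        have hcast : (m : Int) + 1 = ((m + 1 : Nat) : Int) := by push_cast; ring
        rw [hcast, ih (m + 1) (by push_cast; omega) (by push_cast at *; omega)]
        have hlcp : pvLcp (ref.drop m) (r.drop m) = pvLcp (ref.drop (m + 1)) (r.drop (m + 1)) + 1 := by
          rw [hdropr, hdropref, pvLcp, if_pos heq.symm]
        rw [hlcp]
        have : min (k - m) ((pvLcp (ref.drop (m+1)) (r.drop (m+1)) + 1 : Nat) : Int)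
            = 1 + min (k - (m+1)) ((pvLcp (ref.drop (m+1)) (r.drop (m+1)) : Nat) : Int) := by
          push_cast
          omega
        rw [this]
        push_cast
        ring
      · rw [dif_neg (by
          rintro ⟨-, hc⟩
          rw [hgr, hgref] at hc
          simp only [List.getElem?_eq_getElem hmr, List.getElem?_eq_getElem hmref,
            Option.some_inj] at hc
          exact heq hc)]
        have hlcp : pvLcp (ref.drop m) (r.drop m) = 0 := by
          rw [hdropr, hdropref, pvLcp, if_neg (fun h => heq h.symm)]
        rw [hlcp]
        have : min (k - m) (((0 : Nat) : Int)) = 0 := by apply min_eq_right; omega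
        rw [this]; ring

-- generic bounds for the Int min-fold
theorem pvFold_le_init (f : List Int → Int) :
    ∀ (l : List (List Int)) (a : Int), l.foldl (fun k t => min k (f t)) a ≤ a := by
  intro l
  induction l with
  | nil => intro a; simp
  | cons x xs ih =>
      intro a
      calc xs.foldl (fun k t => min k (f t)) (min a (f x)) ≤ min a (f x) := ih _
        _ ≤ a := min_le_left _ _

theorem pvFold_le_mem (f : List Int → Int) :
    ∀ (l : List (List Int)) (a : Int) (t : List Int), t ∈ l →
      l.foldl (fun k t => min k (f t)) a ≤ f t := by
  intro l
  induction l with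
  | nil => intro a t h; simp at h
  | cons x xs ih =>
      intro a t h
      rcases List.mem_cons.mp h with rfl | h
      · calc xs.foldl (fun k t => min k (f t)) (min a (f t)) ≤ min a (f t) := pvFold_le_init f _ _
          _ ≤ f t := min_le_right _ _
      · exact ih _ t h

theorem pvFold_le (f : List Int → Int) :
    ∀ (l : List (List Int)) (a c : Int), c ≤ a → (∀ t ∈ l, c ≤ f t) →
      c ≤ l.foldl (fun k t => min k (f t)) a := by
  intro l
  induction l with
  | nil => intro a c h _; simpa using h
  | cons x xs ih =>
      intro a c h hall
      exact ih _ c (le_min h (hall x (by simp))) (fun t ht => hall t (by simp [ht]))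

theorem pvFold_attained (f : List Int → Int) :
    ∀ (l : List (List Int)) (a : Int),
      l.foldl (fun k t => min k (f t)) a = a ∨
      ∃ t ∈ l, l.foldl (fun k t => min k (f t)) a = f t := by
  intro l
  induction l with
  | nil => intro a; left; rfl
  | cons x xs ih =>
      intro a
      rcases ih (min a (f x)) with h | ⟨t, ht, h⟩
      · rcases min_cases a (f x) with ⟨he, -⟩ | ⟨he, -⟩
        · left; simp only [List.foldl_cons]; rw [h, he]
        · right; exact ⟨x, by simp, by simp only [List.foldl_cons]; rw [h, he]⟩
      · right; exact ⟨t, by simp [ht], by simpa using h⟩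

-- B's fold of pvWhile is the Int min-fold over lcp values
theorem pvBFold_eq (ref : List Int) :
    ∀ (rest : List (List Int)) (k : Int), 0 ≤ k → k ≤ (ref.length : Int) →
      rest.foldl (fun ki t => pvWhile ref t.reverse ki 0) k
        = rest.foldl (fun ki t => min ki ((pvLcp ref t.reverse : Nat) : Int)) k := by
  intro rest
  induction rest with
  | nil => intro k _ _; rfl
  | cons t ts ih =>
      intro k hk0 hkr
      have hstep : pvWhile ref t.reverse k 0 = min k ((pvLcp ref t.reverse : Nat) : Int) := by
        have := pvWhile_eq ref t.reverse k 0 (by exact_mod_cast hk0) hkr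
        simpa using this
      simp only [List.foldl_cons, hstep]
      exact ih _ (le_min hk0 (by exact_mod_cast Nat.zero_le _))
        (le_trans (min_le_left _ _) hkr)

-- A's loop reaches the min-fold value
theorem pvALoop_eq (t0 : List Int) (rest : List (List Int)) (minLen : Int)
    (hub : ∀ t ∈ t0 :: rest, minLen ≤ (t.length : Int)) :
    ∀ (k : Nat), (k : Int) ≤ rest.foldl (fun ki t => min ki ((pvLcp t0.reverse t.reverse : Nat) : Int)) minLen →
      pvALoop (t0 :: rest) t0 minLen ((k : Int) + 1) (k : Int)
        = rest.foldl (fun ki t => min ki ((pvLcp t0.reverse t.reverse : Nat) : Int)) minLen := by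
  set f : List Int → Int := fun t => ((pvLcp t0.reverse t.reverse : Nat) : Int) with hf
  set T : Int := rest.foldl (fun ki t => min ki (f t)) minLen with hT
  have hTmin : T ≤ minLen := pvFold_le_init f rest minLen
  have hTmem : ∀ t ∈ rest, T ≤ f t := fun t ht => pvFold_le_mem f rest minLen t ht
  have hget : ∀ (t : List Int) (k : Nat), k + 1 ≤ t.length →
      PySem.List.pyGet? t (-((k : Int) + 1)) = t.reverse[k]? := by
    intro t k ht
    have h1 : -((k : Int) + 1) = -(((k + 1 : Nat) : Int)) := by push_cast; ring
    rw [h1, PySem.List.pyGet?_neg_natCast t (k + 1) (by omega) ht,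
      List.getElem?_reverse (by omega)]
    congr 1
    omega
  suffices H : ∀ (n : Nat) (k : Nat), (k : Int) ≤ T → (T - k).toNat = n →
      pvALoop (t0 :: rest) t0 minLen ((k : Int) + 1) (k : Int) = T by
    intro k hk; exact H _ k hk rfl
  intro n
  induction n with
  | zero =>
      intro k hk h0
      have hkT : (k : Int) = T := by omega
      rw [pvALoop]
      by_cases hTm : T = minLen
      · rw [dif_neg (by omega)]
        omega
      · have hTltM : T < minLen := lt_of_le_of_ne hTmin hTm
        rw [dif_pos (by omega)]
        -- some list disagrees at column k: the fold is attained at some lcp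
        rcases pvFold_attained f rest minLen with h | ⟨tw, htw, h⟩
        · exact absurd (hT.trans h) hTm
        · have hlcp : f tw = (k : Int) := by rw [← h, ← hT, ← hkT]
          simp only [hf] at hlcp
          have hlcpk : pvLcp t0.reverse tw.reverse = k := by exact_mod_cast hlcp
          have hlen0 : k + 1 ≤ t0.length := by
            have := hub t0 (by simp); omega
          have hlenw : k + 1 ≤ tw.length := by
            have := hub tw (by simp [htw]); omega
          have hne := pvLcp_ne t0.reverse tw.reverse
            (by simp only [List.length_reverse]; omega)
            (by simp only [List.length_reverse]; omega)
          rw [hlcpk] at hne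
          have hcond : ((t0 :: rest).all fun t =>
              PySem.List.pyGet? t (-((k : Int) + 1)) == PySem.List.pyGet? t0 (-((k : Int) + 1))) = false := by
            refine List.all_eq_false.mpr ⟨tw, List.mem_cons_of_mem _ htw, ?_⟩
            rw [hget tw k hlenw, hget t0 k hlen0]
            simpa using fun hc => hne (hc.symm)
          rw [hcond]
          simp only [Bool.false_eq_true, if_false]
          omega
  | succ n ih =>
      intro k hk h0
      have hklt : (k : Int) < T := by omega
      rw [pvALoop, dif_pos (by omega)]
      have hcond : ((t0 :: rest).all fun t =>
          PySem.List.pyGet? t (-((k : Int) + 1)) == PySem.List.pyGet? t0 (-((k : Int) + 1))) = true := by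
        simp only [List.all_eq_true, beq_iff_eq]
        intro t ht
        rcases List.mem_cons.mp ht with rfl | ht
        · rfl
        · have hlent : k + 1 ≤ t.length := by
            have h1 := hub t (by simp [ht])
            have h2 := hTmem t ht
            have h3 := pvLcp_le_right t0.reverse t.reverse
            simp only [List.length_reverse] at h3
            have : (k : Int) < f t := lt_of_lt_of_le hklt (hTmem t ht)
            simp only [hf] at this
            omega
          have hlen0 : k + 1 ≤ t0.length := by
            have := hub t0 (by simp); omega
          rw [hget t k hlent, hget t0 k hlen0]
          have : k < pvLcp t0.reverse t.reverse := by
            have h5 : (k : Int) < f t := lt_of_lt_of_le hklt (hTmem t ht)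
            simp only [hf] at h5
            exact_mod_cast h5
          exact (pvLcp_get t0.reverse t.reverse k this).symm
      rw [hcond]
      simp only [if_true]
      have hcast : (k : Int) + 1 = ((k + 1 : Nat) : Int) := by push_cast; ring
      rw [hcast]
      exact ih (k + 1) (by push_cast; omega) (by omega)

-- ===== VERDICT (by name: the statement is the Claim_ definition above) =====
theorem find_common_suffix_length_py_spec : Claim_equal_find_common_suffix_length_py := by
  intro tls _
  unfold Spec_find_common_suffix_length_py
  cases tls with
  | nil => simp [find_common_suffix_length_py, find_common_suffix_length_py_alt]
  | cons t0 rest =>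
      unfold find_common_suffix_length_py find_common_suffix_length_py_alt
      simp only [List.isEmpty_cons, Bool.false_eq_true, if_false, List.headD_cons]
      cases hmin : PySem.List.min? ((t0 :: rest).map fun t => (t.length : Int)) (fun x => x) with
      | none =>
          exact absurd ((PySem.List.min?_eq_none_iff _ _).mp hmin) (by simp)
      | some minLen =>
          have hub : ∀ t ∈ t0 :: rest, minLen ≤ (t.length : Int) := by
            intro t ht
            exact PySem.List.min?_isMin hmin _ (List.mem_map_of_mem ht)
          obtain ⟨x, hx, hlx⟩ := List.mem_map.mp (PySem.List.min?_mem hmin)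
          set f : List Int → Int := fun t => ((pvLcp t0.reverse t.reverse : Nat) : Int) with hf
          set T : Int := rest.foldl (fun ki t => min ki (f t)) minLen with hT
          have hT0 : (0 : Int) ≤ T := by
            apply pvFold_le
            · have := hub t0 (by simp); omega
            · intro t _; simp only [hf]; exact_mod_cast Nat.zero_le _
          -- A's side
          have hA : pvALoop (t0 :: rest) t0 minLen 1 0 = T := by
            have := pvALoop_eq t0 rest minLen hub 0 (by simpa using hT0)
            simpa using this
          -- B's side
          have hB : rest.foldl (fun ki t => pvWhile t0.reverse t.reverse ki 0) ((t0.reverse.length : Nat) : Int) = T := by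
            rw [show ((t0.reverse.length : Nat) : Int) = ((t0.length : Nat) : Int) by simp]
            rw [pvBFold_eq t0.reverse rest (t0.length : Int) (by positivity) (by simp)]
            -- min-fold from len t0 equals min-fold from minLen
            apply le_antisymm
            · apply pvFold_le
              · -- fold from len t0 ≤ minLen : minLen is attained at some list x
                rcases List.mem_cons.mp hx with rfl | hxr
                · rw [← hlx]; exact pvFold_le_init f rest _
                · calc rest.foldl (fun ki t => min ki (f t)) (t0.length : Int) ≤ f x :=
                        pvFold_le_mem f rest _ x hxr
                    _ ≤ (x.length : Int) := by
                        have := pvLcp_le_right t0.reverse x.reverse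
                        simp only [List.length_reverse] at this
                        simp only [hf]; exact_mod_cast this
                    _ = minLen := hlx
              · intro t ht; exact pvFold_le_mem f rest _ t ht
            · apply pvFold_le
              · calc T ≤ minLen := pvFold_le_init f rest minLen
                  _ ≤ (t0.length : Int) := hub t0 (by simp)
              · intro t ht; exact pvFold_le_mem f rest minLen t ht
          change pvALoop (t0 :: rest) t0 minLen 1 0 = _
          rw [hA]
          exact hB.symm
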